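-- pv_equiv track=rewrite | github.com/bmuralid/Pure-Fortran | xfind_pointer.py | logical_lines_fixed
-- ===== SOURCE A (Python) =====
-- from typing import Iterable, List, Optional, Sequence, Tuple
--
-- def split_code_comment_free(line: str) -> Tuple[str, str]:
--     code = []
--     i = 0
--     in_single = False
--     in_double = False
--     while i < len(line):
--         ch = line[i]
--         if in_single:
--             code.append(ch)
--             if ch == "'":
--                 if i + 1 < len(line) and line[i + 1] == "'":
--                     code.append(line[i + 1])
--                     i += 1
--                 else:
--                     in_single = False
--         elif in_double:
--             code.append(ch)
--             if ch == '"':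
--                 if i + 1 < len(line) and line[i + 1] == '"':
--                     code.append(line[i + 1])
--                     i += 1
--                 else:
--                     in_double = False
--         else:
--             if ch == "!":
--                 return "".join(code), line[i:]
--             code.append(ch)
--             if ch == "'":
--                 in_single = True
--             elif ch == '"':
--                 in_double = True
--         i += 1
--     return "".join(code), ""
--
-- def is_fixed_comment(raw: str) -> bool:
--     if not raw:
--         return False
--     first = raw[0]
--     return first in "cC*!"
--
-- def logical_lines_fixed(lines: Sequence[str]) -> Iterable[Tuple[int, str]]:
--     buf = ""
--     start_line = 1
--     for lineno, raw in enumerate(lines, start=1):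
--         line = raw.rstrip("\n")
--         if not line.strip():
--             continue
--         if is_fixed_comment(line):
--             continue
--         padded = line + " " * max(0, 6 - len(line))
--         cont = len(padded) >= 6 and padded[5] not in {" ", "0"}
--         text = padded[6:72] if len(padded) > 6 else ""
--         code, _comment = split_code_comment_free(text)
--         work = code.strip()
--         if not cont:
--             if buf:
--                 yield start_line, buf
--             buf = work
--             start_line = lineno
--         else:
--             if not buf:
--                 buf = work
--                 start_line = lineno
--             else:
--                 buf += " " + work
--     if buf:
--         yield start_line, buf
-- ===== SOURCE B (Python) =====
-- from typing import Iterable, List, Optional, Sequence, Tuple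
--
-- def split_code_comment_free(line: str) -> Tuple[str, str]:
--     code = []
--     i = 0
--     in_single = False
--     in_double = False
--     while i < len(line):
--         ch = line[i]
--         if in_single:
--             code.append(ch)
--             if ch == "'":
--                 if i + 1 < len(line) and line[i + 1] == "'":
--                     code.append(line[i + 1])
--                     i += 1
--                 else:
--                     in_single = False
--         elif in_double:
--             code.append(ch)
--             if ch == '"':
--                 if i + 1 < len(line) and line[i + 1] == '"':
--                     code.append(line[i + 1])
--                     i += 1
--                 else:
--                     in_double = False
--         else:
--             if ch == "!":
--                 return "".join(code), line[i:]
--             code.append(ch)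
--             if ch == "'":
--                 in_single = True
--             elif ch == '"':
--                 in_double = True
--         i += 1
--     return "".join(code), ""
--
-- def is_fixed_comment(raw: str) -> bool:
--     if not raw:
--         return False
--     first = raw[0]
--     return first in "cC*!"
--
-- def logical_lines_fixed(lines: Sequence[str]) -> Iterable[Tuple[int, str]]:
--     # Pass 1: classify every line into a record (lineno, is_continuation, statement text),
--     # dropping blank and comment lines.
--     records = []
--     for lineno, raw in enumerate(lines, start=1):
--         line = raw.rstrip("\n")
--         if not line.strip() or is_fixed_comment(line):
--             continue
--         padded = line + " " * max(0, 6 - len(line))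
--         records.append((lineno,
--                         padded[5] not in " 0",
--                         split_code_comment_free(padded[6:72])[0].strip()))
--     # Pass 2: recursive-descent grouping — consume one logical line at a time: take an
--     # opener record (its continuation mark is irrelevant: nothing is pending), then eat
--     # the run of continuation records that follows it.  An opener with empty text leaves
--     # nothing pending, so the records after it open their own logical lines.
--     i = 0
--     n = len(records)
--     while i < n:
--         lineno, _cont, work = records[i]
--         i += 1
--         if not work:
--             continue
--         parts = [work]
--         while i < n and records[i][1]:
--             parts.append(records[i][2])
--             i += 1
--         yield lineno, " ".join(parts)
-- ===== Notes on version B (the rewrite author's own statement) =====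
-- stated objective: alternative
-- what changed: A's single stateful loop threading a growing buffer string and start_line through every source line is replaced by a classification pass into (lineno, cont, work) records followed by recursive-descent grouping: an outer loop consumes one opener record per logical line and an inner loop eats the run of continuation records after it, joining the pieces at once; no pending-buffer state survives across iterations.
import Mathlib
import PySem

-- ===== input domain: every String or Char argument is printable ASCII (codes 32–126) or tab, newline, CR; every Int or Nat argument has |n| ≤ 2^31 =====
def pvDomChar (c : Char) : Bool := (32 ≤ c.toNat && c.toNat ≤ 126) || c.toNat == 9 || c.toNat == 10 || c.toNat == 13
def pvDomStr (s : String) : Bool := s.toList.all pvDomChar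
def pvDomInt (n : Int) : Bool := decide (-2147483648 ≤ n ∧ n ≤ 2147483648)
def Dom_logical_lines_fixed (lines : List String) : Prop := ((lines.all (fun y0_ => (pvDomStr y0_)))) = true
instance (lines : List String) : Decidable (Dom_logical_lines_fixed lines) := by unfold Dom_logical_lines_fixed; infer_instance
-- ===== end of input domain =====

-- B replaces A's single stateful buffer loop by a classification pass into records followed by
-- recursive-descent grouping (consume one opener, then the run of continuation records after it);
-- objective: alternative decomposition, same cost.

-- shared helper: Python str.rstrip("\n") (PySem has no chars-argument rstrip); exact: drops trailing '\n' chars only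
def rstripNl (cs : List Char) : List Char := (cs.reverse.dropWhile (fun c => c == '\n')).reverse

-- shared helpers for the locals `line` and `padded` (identical expressions in both Pythons)
def lineOf (raw : String) : String := String.ofList (rstripNl raw.toList)
def paddedOf (line : String) : String :=
  line ++ String.ofList (List.replicate (6 - (PySem.Str.len line).toNat) ' ')   -- line + " " * max(0, 6 - len(line))

-- ===== PORT A =====
-- the while loop of split_code_comment_free, step for step (i-advance = structural recursion, lookahead = head of rest)
def sccf_go : List Char → Bool → Bool → List Char → (List Char × List Char)
  | [], _, _, code => (code.reverse, [])
  | ch :: rest, in_single, in_double, code =>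
    if in_single then
      if ch == '\'' then
        match rest with
        | c2 :: rest2 =>
          if c2 == '\'' then sccf_go rest2 true in_double (c2 :: ch :: code)
          else sccf_go (c2 :: rest2) false in_double (ch :: code)
        | [] => sccf_go [] false in_double (ch :: code)
      else sccf_go rest true in_double (ch :: code)
    else if in_double then
      if ch == '"' then
        match rest with
        | c2 :: rest2 =>
          if c2 == '"' then sccf_go rest2 in_single true (c2 :: ch :: code)
          else sccf_go (c2 :: rest2) in_single false (ch :: code)
        | [] => sccf_go [] in_single false (ch :: code)
      else sccf_go rest in_single true (ch :: code)
    else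
      if ch == '!' then (code.reverse, ch :: rest)
      else if ch == '\'' then sccf_go rest true in_double (ch :: code)
      else if ch == '"' then sccf_go rest in_single true (ch :: code)
      else sccf_go rest in_single in_double (ch :: code)
termination_by cs _ _ _ => cs.length
decreasing_by all_goals simp [List.length_cons]

def split_code_comment_free (line : String) : String × String :=
  let p := sccf_go line.toList false false []
  (String.ofList p.1, String.ofList p.2)

def is_fixed_comment (raw : String) : Bool :=
  match raw.toList with
  | [] => false
  | first :: _ => "cC*!".toList.contains first   -- `first in "cC*!"`: 1-char membership

-- A's locals `cont`, `text`, `work`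
def contA (padded : String) : Bool :=
  decide (6 ≤ PySem.Str.len padded) &&
    ((PySem.Str.pyGet? padded 5).elim false (fun c => !(c == ' ' || c == '0')))
def textA (padded : String) : String :=
  if 6 < PySem.Str.len padded then PySem.Str.slice padded (some 6) (some 72) else ""
def workA (padded : String) : String :=
  PySem.Str.strip (split_code_comment_free (textA padded)).1

def logical_lines_fixed_go : List String → Int → String → Int → List (Int × String)
  | [], _, buf, start_line => if buf = "" then [] else [(start_line, buf)]
  | raw :: rest, lineno, buf, start_line =>
    let line := lineOf raw
    if PySem.Str.strip line = "" then logical_lines_fixed_go rest (lineno + 1) buf start_line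
    else if is_fixed_comment line then logical_lines_fixed_go rest (lineno + 1) buf start_line
    else
      let work := workA (paddedOf line)
      if contA (paddedOf line) = false then
        if buf = "" then logical_lines_fixed_go rest (lineno + 1) work lineno
        else (start_line, buf) :: logical_lines_fixed_go rest (lineno + 1) work lineno
      else
        if buf = "" then logical_lines_fixed_go rest (lineno + 1) work lineno
        else logical_lines_fixed_go rest (lineno + 1) (buf ++ " " ++ work) start_line

def logical_lines_fixed (lines : List String) : List (Int × String) :=
  logical_lines_fixed_go lines 1 "" 1

-- ===== PORT B =====
-- B's locals `cont` (padded[5] not in " 0") and `work` (padded[6:72] taken unconditionally)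
def contB (padded : String) : Bool :=
  (PySem.Str.pyGet? padded 5).elim false (fun c => !(c == ' ' || c == '0'))
def workB (padded : String) : String :=
  PySem.Str.strip (split_code_comment_free (PySem.Str.slice padded (some 6) (some 72))).1

-- pass 1: the classify-and-append loop of Source B, dropping blank/comment lines
def recordsGo : List String → Int → List (Int × Bool × String)
  | [], _ => []
  | raw :: rest, lineno =>
    let line := lineOf raw
    if PySem.Str.strip line = "" then recordsGo rest (lineno + 1)
    else if is_fixed_comment line then recordsGo rest (lineno + 1)
    else (lineno, contB (paddedOf line), workB (paddedOf line)) :: recordsGo rest (lineno + 1)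

-- Source B's inner `while i < n and records[i][1]` loop: collect the run of continuation works
def consumeRun : List (Int × Bool × String) → List String × List (Int × Bool × String)
  | [] => ([], [])
  | r :: rest =>
    if r.2.1 then
      let pr := consumeRun rest
      (r.2.2 :: pr.1, pr.2)
    else ([], r :: rest)

lemma consumeRun_length_le (rs : List (Int × Bool × String)) : (consumeRun rs).2.length ≤ rs.length := by
  induction rs with
  | nil => simp [consumeRun]
  | cons r rest ih =>
    simp only [consumeRun]
    split
    · exact le_trans ih (Nat.le_succ _)
    · simp

-- Source B's outer `while i < n` loop: one logical line per iteration
def emitGroups : List (Int × Bool × String) → List (Int × String)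
  | [] => []
  | r :: rest =>
    if r.2.2 = "" then emitGroups rest
    else
      let pr := consumeRun rest
      (r.1, PySem.Str.join " " (r.2.2 :: pr.1)) :: emitGroups pr.2
termination_by rs => rs.length
decreasing_by
  · simp
  · exact Nat.lt_succ_of_le (consumeRun_length_le rest)

def logical_lines_fixed_alt (lines : List String) : List (Int × String) :=
  emitGroups (recordsGo lines 1)

-- ===== PRECONDITION & SPEC =====
def Spec_logical_lines_fixed (lines : List String) (out : List (Int × String)) : Prop := out = logical_lines_fixed_alt lines
instance (lines : List String) (out : List (Int × String)) : Decidable (Spec_logical_lines_fixed lines out) := by unfold Spec_logical_lines_fixed; infer_instance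

-- ===== CLAIM (what is proved, stated in full; the proofs are below) =====
def Claim_equal_logical_lines_fixed : Prop := ∀ (lines : List String), Dom_logical_lines_fixed lines → Spec_logical_lines_fixed lines (logical_lines_fixed lines)

-- ===== LEMMAS AND PROOFS =====

-- proof-side record machine: A's loop expressed over the classified records
def group_go : List (Int × Bool × String) → Option (Int × String) → List (Int × String)
  | [], none => []
  | [], some g => [g]
  | (lineno, _cont, work) :: rest, none =>
    if work ≠ "" then group_go rest (some (lineno, work)) else group_go rest none
  | (lineno, cont, work) :: rest, some (s, b) =>
    if cont then group_go rest (some (s, b ++ " " ++ work))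
    else (s, b) :: group_go rest (if work ≠ "" then some (lineno, work) else none)

lemma append_space_ne (a b : String) : a ++ " " ++ b ≠ "" := by
  intro h
  have h2 := congrArg String.toList h
  simp [String.toList_append] at h2

lemma append_space_ne' (a : String) : a ++ " " ≠ "" := by
  intro h
  have h2 := congrArg String.toList h
  simp [String.toList_append] at h2

lemma padded_len (line : String) : 6 ≤ PySem.Str.len (paddedOf line) := by
  simp [paddedOf, PySem.Str.len_eq, String.toList_append]
  omega

lemma cont_eq (line : String) : contA (paddedOf line) = contB (paddedOf line) := by
  unfold contA contB
  rw [decide_eq_true (padded_len line), Bool.true_and]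

lemma work_eq (line : String) : workA (paddedOf line) = workB (paddedOf line) := by
  unfold workA workB textA
  have h := padded_len line
  by_cases h6 : 6 < PySem.Str.len (paddedOf line)
  · rw [if_pos h6]
  · rw [if_neg h6]
    have hlen : (paddedOf line).toList.length = 6 := by
      have := PySem.Str.len_eq (paddedOf line)
      omega
    have hsl : (PySem.Str.slice (paddedOf line) (some 6) (some 72)).toList = [] := by
      rw [PySem.Str.toList_slice, PySem.Chars.slice_eq_listSlice,
        PySem.List.slice_toNat _ (by norm_num) (by norm_num)]
      simp [List.drop_eq_nil_of_le, hlen]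
    have : PySem.Str.slice (paddedOf line) (some 6) (some 72) = "" :=
      String.toList_injective (by simp [hsl])
    rw [this]

-- A's line-by-line loop equals the record machine over the classified records
lemma go_eq (ls : List String) : ∀ (lineno : Int) (buf : String) (start : Int),
    logical_lines_fixed_go ls lineno buf start =
      group_go (recordsGo ls lineno) (if buf = "" then none else some (start, buf)) := by
  induction ls with
  | nil =>
    intro lineno buf start
    by_cases h : buf = "" <;> simp [logical_lines_fixed_go, recordsGo, group_go, h]
  | cons raw rest ih =>
    intro lineno buf start
    by_cases h1 : PySem.Str.strip (lineOf raw) = ""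
    · simp only [logical_lines_fixed_go, recordsGo, h1, ite_true]
      exact ih (lineno + 1) buf start
    · cases hc : is_fixed_comment (lineOf raw) with
      | true =>
        simp only [logical_lines_fixed_go, recordsGo, h1, hc, ite_true, ite_false]
        exact ih (lineno + 1) buf start
      | false =>
        simp only [logical_lines_fixed_go, recordsGo, h1, hc, ite_false,
          Bool.false_eq_true, cont_eq, work_eq]
        by_cases hb : buf = ""
        · cases hcont : contB (paddedOf (lineOf raw)) <;>
            by_cases hw : workB (paddedOf (lineOf raw)) = "" <;>
              simp [hb, hcont, hw, group_go, ih (lineno + 1) (workB (paddedOf (lineOf raw))) lineno,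
                ih (lineno + 1) "" lineno]
        · cases hcont : contB (paddedOf (lineOf raw)) <;>
            by_cases hw : workB (paddedOf (lineOf raw)) = "" <;>
              simp [hb, hcont, hw, group_go,
                ih (lineno + 1) (workB (paddedOf (lineOf raw))) lineno,
                ih (lineno + 1) (buf ++ " " ++ workB (paddedOf (lineOf raw))) start,
                append_space_ne buf (workB (paddedOf (lineOf raw))),
                ih (lineno + 1) "" lineno, ih (lineno + 1) (buf ++ " ") start,
                append_space_ne' buf]

lemma join_singleton (b : String) : PySem.Str.join " " [b] = b := by
  simp [PySem.Str.join, PySem.Chars.join_singleton]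

lemma join_cons_cons (b w : String) (ps : List String) :
    PySem.Str.join " " (b :: w :: ps) = PySem.Str.join " " ((b ++ " " ++ w) :: ps) := by
  cases ps with
  | nil => simp [PySem.Str.join, PySem.Chars.join_cons_cons, PySem.Chars.join_singleton]
  | cons r rs => simp [PySem.Str.join, PySem.Chars.join_cons_cons, List.append_assoc]

-- the record machine equals B's recursive-descent grouping (strong induction on the record list)
lemma machine_eq (n : Nat) : ∀ (rs : List (Int × Bool × String)), rs.length ≤ n →
    (group_go rs none = emitGroups rs ∧
     ∀ (s : Int) (b : String),
       group_go rs (some (s, b)) =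
         (s, PySem.Str.join " " (b :: (consumeRun rs).1)) :: emitGroups (consumeRun rs).2) := by
  induction n with
  | zero =>
    intro rs h
    have : rs = [] := List.length_eq_zero_iff.mp (Nat.le_zero.mp h)
    subst this
    exact ⟨by simp [group_go, emitGroups], fun s b => by simp [group_go, consumeRun, emitGroups, join_singleton]⟩
  | succ n ih =>
    intro rs h
    match rs with
    | [] => exact ⟨by simp [group_go, emitGroups], fun s b => by simp [group_go, consumeRun, emitGroups, join_singleton]⟩
    | (l, c, w) :: rest =>
      have hrest : rest.length ≤ n := by simpa using Nat.lt_succ_iff.mp (Nat.lt_of_lt_of_le (by simp) h)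
      constructor
      · -- group_go (r::rest) none = emitGroups (r::rest)
        by_cases hw : w = ""
        · simp [group_go, emitGroups, hw, (ih rest hrest).1]
        · simp [group_go, emitGroups, hw, (ih rest hrest).2 l w]
      · intro s b
        by_cases hc : c = true
        · -- continuation: append and recurse
          simp only [group_go, hc, ite_true, consumeRun]
          rw [(ih rest hrest).2 s (b ++ " " ++ w)]
          simp [join_cons_cons]
        · -- opener follows: close (s,b), rest re-enters the none machine = emitGroups on (r::rest)
          have hc' : c = false := by simpa using hc
          subst hc'
          have hL : group_go ((l, false, w) :: rest) (some (s, b)) =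
              (s, b) :: group_go rest (if w ≠ "" then some (l, w) else none) := by
            simp [group_go]
          have hR : consumeRun ((l, false, w) :: rest) = ([], (l, false, w) :: rest) := by
            simp [consumeRun]
          rw [hL, hR, join_singleton]
          congr 1
          by_cases hw : w = ""
          · simp [hw, emitGroups, (ih rest hrest).1]
          · simp [hw, emitGroups, (ih rest hrest).2 l w]

-- ===== VERDICT (by name: the statement is the Claim_ definition above) =====
theorem logical_lines_fixed_spec : Claim_equal_logical_lines_fixed := by
  intro lines _
  unfold Spec_logical_lines_fixed logical_lines_fixed logical_lines_fixed_alt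
  rw [go_eq lines 1 "" 1]
  simpa using (machine_eq (recordsGo lines 1).length (recordsGo lines 1) le_rfl).1
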